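-- pv_equiv track=rewrite | github.com/masein/accounting-assistant-web | app/services/reporting/uk_statement_service.py | _bs_bucket_for_code
-- ===== SOURCE A (Python) =====
-- _UK_BS_MAP: list[tuple[str, str]] = [
--     # Intangible assets (NBV = cost − accum amort, both classified ASSET so
--     # the contra-amort accounts naturally subtract via signed sum).
--     ("01", "fa_intangibles"),
--     # Tangible fixed assets — NBV
--     ("00", "fa_tangibles"),
--     # Investments held as fixed assets
--     ("02", "fa_investments"),
--     # Current assets
--     ("1000", "ca_stocks"),
--     ("1100", "ca_debtors"),
--     ("1300", "ca_debtors"),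
--     ("1400", "ca_debtors"),
--     ("1200", "ca_cash"),
--     ("1210", "ca_cash"),
--     ("1220", "ca_cash"),
--     # Creditors due within one year (current liabilities)
--     ("21", "cl_creditors"),
--     ("22", "cl_creditors"),
--     ("23", "cl_creditors"),
--     ("24", "cl_creditors"),
--     ("25", "cl_creditors"),
--     ("26", "cl_creditors"),
--     ("27", "cl_creditors"),
--     # Provisions for liabilities
--     ("295", "ncl_provisions"),
--     # Creditors due after more than one year
--     ("28", "ncl_creditors"),
--     ("29", "ncl_creditors"),
--     # Capital and reserves
--     ("3000", "eq_share_capital"),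
--     ("3010", "eq_share_premium"),
--     ("3020", "eq_revaluation_reserve"),
--     ("3030", "eq_other_reserves"),
--     ("3100", "eq_pl_account"),
-- ]
--
-- def _bs_section_for_bucket(bucket: str) -> str:
--     if bucket.startswith("fa_"):
--         return "fixed_assets"
--     if bucket.startswith("ca_"):
--         return "current_assets"
--     if bucket.startswith("cl_"):
--         return "current_liabilities"
--     if bucket.startswith("ncl_"):
--         return "non_current_liabilities"
--     if bucket.startswith("eq_"):
--         return "equity"
--     return "other"
--
-- def _bs_bucket_for_code(code: str) -> tuple[str, str] | None:
--     c = (code or "").strip()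
--     if not c:
--         return None
--     for prefix, bucket in _UK_BS_MAP:
--         if c.startswith(prefix):
--             return (_bs_section_for_bucket(bucket), bucket)
--     return None
-- ===== SOURCE B (Python) =====
-- # The prefix table is compiled into a hand-written decision tree on the first characters
-- # of the stripped code (no table, no scan); returns the (section, bucket) pair inline.
--
-- def _bs_bucket_for_code(code):
--     c = (code or "").strip()
--     if not c:
--         return None
--     ch = c[0]
--     if ch == "0":
--         d = c[1:2]
--         if d == "1":
--             return ("fixed_assets", "fa_intangibles")
--         if d == "0":
--             return ("fixed_assets", "fa_tangibles")
--         if d == "2":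
--             return ("fixed_assets", "fa_investments")
--         return None
--     if ch == "1":
--         p = c[:4]
--         if p == "1000":
--             return ("current_assets", "ca_stocks")
--         if p in ("1100", "1300", "1400"):
--             return ("current_assets", "ca_debtors")
--         if p in ("1200", "1210", "1220"):
--             return ("current_assets", "ca_cash")
--         return None
--     if ch == "2":
--         d = c[1:2]
--         if d in ("1", "2", "3", "4", "5", "6", "7"):
--             return ("current_liabilities", "cl_creditors")
--         if d == "8":
--             return ("non_current_liabilities", "ncl_creditors")
--         if d == "9":
--             if c[2:3] == "5":
--                 return ("non_current_liabilities", "ncl_provisions")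
--             return ("non_current_liabilities", "ncl_creditors")
--         return None
--     if ch == "3":
--         p = c[:4]
--         if p == "3000":
--             return ("equity", "eq_share_capital")
--         if p == "3010":
--             return ("equity", "eq_share_premium")
--         if p == "3020":
--             return ("equity", "eq_revaluation_reserve")
--         if p == "3030":
--             return ("equity", "eq_other_reserves")
--         if p == "3100":
--             return ("equity", "eq_pl_account")
--         return None
--     return None
-- ===== Notes on version B (the rewrite author's own statement) =====
-- stated objective: alternative
-- what changed: Replaced the ordered linear scan of the 25-entry (prefix, bucket) list plus the separate bucket->section helper by a hand-written decision tree that branches on the first characters of the stripped code and returns the (section, bucket) pair inline, with no table and no loop.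
import Mathlib
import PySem

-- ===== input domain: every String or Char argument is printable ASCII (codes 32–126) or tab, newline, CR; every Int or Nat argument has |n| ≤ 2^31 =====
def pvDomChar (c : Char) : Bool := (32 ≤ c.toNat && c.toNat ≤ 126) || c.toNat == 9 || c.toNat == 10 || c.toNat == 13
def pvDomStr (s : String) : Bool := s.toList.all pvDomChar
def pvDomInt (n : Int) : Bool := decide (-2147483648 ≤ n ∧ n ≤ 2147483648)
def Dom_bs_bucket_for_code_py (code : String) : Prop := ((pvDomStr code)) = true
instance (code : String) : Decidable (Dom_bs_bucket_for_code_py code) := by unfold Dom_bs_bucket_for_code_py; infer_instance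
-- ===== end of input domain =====

-- B replaces A's ordered linear scan of the prefix table (plus the bucket→section helper) by a
-- hand-written decision tree on the first characters of the stripped code (alternative decomposition).

-- ===== PORT A =====
def pvBsSection (bucket : List Char) : String :=
  if PySem.Chars.startswith bucket ['f','a','_'] then "fixed_assets"
  else if PySem.Chars.startswith bucket ['c','a','_'] then "current_assets"
  else if PySem.Chars.startswith bucket ['c','l','_'] then "current_liabilities"
  else if PySem.Chars.startswith bucket ['n','c','l','_'] then "non_current_liabilities"
  else if PySem.Chars.startswith bucket ['e','q','_'] then "equity"
  else "other"

def pvUkBsMap : List (List Char × List Char) :=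
  [(['0','1'], "fa_intangibles".toList),
   (['0','0'], "fa_tangibles".toList),
   (['0','2'], "fa_investments".toList),
   (['1','0','0','0'], "ca_stocks".toList),
   (['1','1','0','0'], "ca_debtors".toList),
   (['1','3','0','0'], "ca_debtors".toList),
   (['1','4','0','0'], "ca_debtors".toList),
   (['1','2','0','0'], "ca_cash".toList),
   (['1','2','1','0'], "ca_cash".toList),
   (['1','2','2','0'], "ca_cash".toList),
   (['2','1'], "cl_creditors".toList),
   (['2','2'], "cl_creditors".toList),
   (['2','3'], "cl_creditors".toList),
   (['2','4'], "cl_creditors".toList),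
   (['2','5'], "cl_creditors".toList),
   (['2','6'], "cl_creditors".toList),
   (['2','7'], "cl_creditors".toList),
   (['2','9','5'], "ncl_provisions".toList),
   (['2','8'], "ncl_creditors".toList),
   (['2','9'], "ncl_creditors".toList),
   (['3','0','0','0'], "eq_share_capital".toList),
   (['3','0','1','0'], "eq_share_premium".toList),
   (['3','0','2','0'], "eq_revaluation_reserve".toList),
   (['3','0','3','0'], "eq_other_reserves".toList),
   (['3','1','0','0'], "eq_pl_account".toList)]

def pvAScan (c : List Char) : List (List Char × List Char) → Option (String × String)
  | [] => none
  | (p, b) :: rest =>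
    if PySem.Chars.startswith c p then some (pvBsSection b, String.ofList b) else pvAScan c rest

def bs_bucket_for_code_py (code : String) : Option (String × String) :=
  let c := PySem.Chars.strip code.toList
  if c = [] then none else pvAScan c pvUkBsMap



-- ===== PORT B =====
-- decision tree on the stripped code's first characters; c[1:2] → rest.take 1, c[:4] → c.take 4,
-- c[2:3] → (rest.drop 1).take 1 (exact: these Python slices clamp, exactly as take/drop do);
-- `p in (k1, k2, k3)` is tested in tuple order, i.e. k1 = p, then k2 = p, then k3 = p.
def pvAltTree (c : List Char) : Option (String × String) :=
  match c with
  | [] => none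
  | ch :: rest =>
    if ch = '0' then
      let d := rest.take 1
      if ['1'] = d then some ("fixed_assets", "fa_intangibles")
      else if ['0'] = d then some ("fixed_assets", "fa_tangibles")
      else if ['2'] = d then some ("fixed_assets", "fa_investments")
      else none
    else if ch = '1' then
      let p := (ch :: rest).take 4
      if ['1','0','0','0'] = p then some ("current_assets", "ca_stocks")
      else if ['1','1','0','0'] = p then some ("current_assets", "ca_debtors")
      else if ['1','3','0','0'] = p then some ("current_assets", "ca_debtors")
      else if ['1','4','0','0'] = p then some ("current_assets", "ca_debtors")
      else if ['1','2','0','0'] = p then some ("current_assets", "ca_cash")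
      else if ['1','2','1','0'] = p then some ("current_assets", "ca_cash")
      else if ['1','2','2','0'] = p then some ("current_assets", "ca_cash")
      else none
    else if ch = '2' then
      let d := rest.take 1
      if ['1'] = d ∨ ['2'] = d ∨ ['3'] = d ∨ ['4'] = d ∨ ['5'] = d ∨ ['6'] = d ∨ ['7'] = d then
        some ("current_liabilities", "cl_creditors")
      else if ['8'] = d then some ("non_current_liabilities", "ncl_creditors")
      else if ['9'] = d then
        if ['5'] = (rest.drop 1).take 1 then some ("non_current_liabilities", "ncl_provisions")
        else some ("non_current_liabilities", "ncl_creditors")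
      else none
    else if ch = '3' then
      let p := (ch :: rest).take 4
      if ['3','0','0','0'] = p then some ("equity", "eq_share_capital")
      else if ['3','0','1','0'] = p then some ("equity", "eq_share_premium")
      else if ['3','0','2','0'] = p then some ("equity", "eq_revaluation_reserve")
      else if ['3','0','3','0'] = p then some ("equity", "eq_other_reserves")
      else if ['3','1','0','0'] = p then some ("equity", "eq_pl_account")
      else none
    else none

def bs_bucket_for_code_py_alt (code : String) : Option (String × String) :=
  pvAltTree (PySem.Chars.strip code.toList)


-- ===== PRECONDITION & SPEC =====
def Spec_bs_bucket_for_code_py (code : String) (out : Option (String × String)) : Prop := out = bs_bucket_for_code_py_alt code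
instance (code : String) (out : Option (String × String)) : Decidable (Spec_bs_bucket_for_code_py code out) := by unfold Spec_bs_bucket_for_code_py; infer_instance

-- ===== CLAIM (what is proved, stated in full; the proofs are below) =====
def Claim_equal_bs_bucket_for_code_py : Prop := ∀ (code : String), Dom_bs_bucket_for_code_py code → Spec_bs_bucket_for_code_py code (bs_bucket_for_code_py code)

-- ===== LEMMAS AND PROOFS =====
theorem pvSec0 : pvBsSection "fa_intangibles".toList = "fixed_assets" := rfl
theorem pvOf0 : String.ofList "fa_intangibles".toList = "fa_intangibles" := rfl
theorem pvSec1 : pvBsSection "fa_tangibles".toList = "fixed_assets" := rfl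
theorem pvOf1 : String.ofList "fa_tangibles".toList = "fa_tangibles" := rfl
theorem pvSec2 : pvBsSection "fa_investments".toList = "fixed_assets" := rfl
theorem pvOf2 : String.ofList "fa_investments".toList = "fa_investments" := rfl
theorem pvSec3 : pvBsSection "ca_stocks".toList = "current_assets" := rfl
theorem pvOf3 : String.ofList "ca_stocks".toList = "ca_stocks" := rfl
theorem pvSec4 : pvBsSection "ca_debtors".toList = "current_assets" := rfl
theorem pvOf4 : String.ofList "ca_debtors".toList = "ca_debtors" := rfl
theorem pvSec5 : pvBsSection "ca_cash".toList = "current_assets" := rfl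
theorem pvOf5 : String.ofList "ca_cash".toList = "ca_cash" := rfl
theorem pvSec6 : pvBsSection "cl_creditors".toList = "current_liabilities" := rfl
theorem pvOf6 : String.ofList "cl_creditors".toList = "cl_creditors" := rfl
theorem pvSec7 : pvBsSection "ncl_provisions".toList = "non_current_liabilities" := rfl
theorem pvOf7 : String.ofList "ncl_provisions".toList = "ncl_provisions" := rfl
theorem pvSec8 : pvBsSection "ncl_creditors".toList = "non_current_liabilities" := rfl
theorem pvOf8 : String.ofList "ncl_creditors".toList = "ncl_creditors" := rfl
theorem pvSec9 : pvBsSection "eq_share_capital".toList = "equity" := rfl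
theorem pvOf9 : String.ofList "eq_share_capital".toList = "eq_share_capital" := rfl
theorem pvSec10 : pvBsSection "eq_share_premium".toList = "equity" := rfl
theorem pvOf10 : String.ofList "eq_share_premium".toList = "eq_share_premium" := rfl
theorem pvSec11 : pvBsSection "eq_revaluation_reserve".toList = "equity" := rfl
theorem pvOf11 : String.ofList "eq_revaluation_reserve".toList = "eq_revaluation_reserve" := rfl
theorem pvSec12 : pvBsSection "eq_other_reserves".toList = "equity" := rfl
theorem pvOf12 : String.ofList "eq_other_reserves".toList = "eq_other_reserves" := rfl
theorem pvSec13 : pvBsSection "eq_pl_account".toList = "equity" := rfl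
theorem pvOf13 : String.ofList "eq_pl_account".toList = "eq_pl_account" := rfl

set_option maxHeartbeats 4000000 in
theorem pvCore (c : List Char) : pvAScan c pvUkBsMap = pvAltTree c := by
  match c with
  | [] => rfl
  | a :: t =>
    rcases eq_or_ne a '0' with rfl | ha0
    · match t with
      | [] => decide
      | b :: t2 =>
        simp only [pvAScan, pvUkBsMap, pvAltTree, PySem.Chars.startswith,
          List.take, List.drop, List.isPrefixOf, List.cons_beq_cons, List.nil_beq_eq,
          List.isEmpty_cons, List.isEmpty_nil, Char.reduceBEq, Bool.and_false, Bool.and_true,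
          Bool.false_and, Bool.true_and, Bool.false_eq_true, if_false, if_true,
          Bool.and_eq_true, beq_iff_eq, List.cons.injEq, and_true, true_and, Char.reduceEq,
          reduceCtorEq, false_and, and_false, or_false, false_or,
          pvSec0, pvSec1, pvSec2, pvSec3, pvSec4, pvSec5, pvSec6, pvSec7, pvSec8,
          pvOf0, pvOf1, pvOf2, pvOf3, pvOf4, pvOf5, pvOf6, pvOf7, pvOf8,
          pvOf9, pvOf10, pvOf11, pvOf12, pvOf13, pvSec9, pvSec10, pvSec11, pvSec12, pvSec13]
        all_goals first
        | rfl
        | decide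
        | (split_ifs <;> first | rfl | tauto | (exfalso; subst_vars; simp_all))
    · rcases eq_or_ne a '1' with rfl | ha1
      · match t with
        | [] => decide
        | [b] =>
          simp only [pvAScan, pvUkBsMap, pvAltTree, PySem.Chars.startswith,
            List.take, List.drop, List.isPrefixOf, List.cons_beq_cons, List.nil_beq_eq,
            List.isEmpty_cons, List.isEmpty_nil, Char.reduceBEq, Bool.and_false, Bool.and_true,
            Bool.false_and, Bool.true_and, Bool.false_eq_true, if_false, if_true,
            Bool.and_eq_true, beq_iff_eq, List.cons.injEq, and_true, true_and, Char.reduceEq,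
            reduceCtorEq, false_and, and_false, or_false, false_or,
            pvSec0, pvSec1, pvSec2, pvSec3, pvSec4, pvSec5, pvSec6, pvSec7, pvSec8,
            pvOf0, pvOf1, pvOf2, pvOf3, pvOf4, pvOf5, pvOf6, pvOf7, pvOf8,
            pvOf9, pvOf10, pvOf11, pvOf12, pvOf13, pvSec9, pvSec10, pvSec11, pvSec12, pvSec13]
          all_goals first
          | rfl
          | decide
          | (split_ifs <;> first | rfl | tauto | (exfalso; subst_vars; simp_all))
        | [b, x] =>
          simp only [pvAScan, pvUkBsMap, pvAltTree, PySem.Chars.startswith,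
            List.take, List.drop, List.isPrefixOf, List.cons_beq_cons, List.nil_beq_eq,
            List.isEmpty_cons, List.isEmpty_nil, Char.reduceBEq, Bool.and_false, Bool.and_true,
            Bool.false_and, Bool.true_and, Bool.false_eq_true, if_false, if_true,
            Bool.and_eq_true, beq_iff_eq, List.cons.injEq, and_true, true_and, Char.reduceEq,
            reduceCtorEq, false_and, and_false, or_false, false_or,
            pvSec0, pvSec1, pvSec2, pvSec3, pvSec4, pvSec5, pvSec6, pvSec7, pvSec8,
            pvOf0, pvOf1, pvOf2, pvOf3, pvOf4, pvOf5, pvOf6, pvOf7, pvOf8,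
            pvOf9, pvOf10, pvOf11, pvOf12, pvOf13, pvSec9, pvSec10, pvSec11, pvSec12, pvSec13]
          all_goals first
          | rfl
          | decide
          | (split_ifs <;> first | rfl | tauto | (exfalso; subst_vars; simp_all))
        | b :: x :: y :: t4 =>
          simp only [pvAScan, pvUkBsMap, pvAltTree, PySem.Chars.startswith,
            List.take, List.drop, List.isPrefixOf, List.cons_beq_cons, List.nil_beq_eq,
            List.isEmpty_cons, List.isEmpty_nil, Char.reduceBEq, Bool.and_false, Bool.and_true,
            Bool.false_and, Bool.true_and, Bool.false_eq_true, if_false, if_true,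
            Bool.and_eq_true, beq_iff_eq, List.cons.injEq, and_true, true_and, Char.reduceEq,
            reduceCtorEq, false_and, and_false, or_false, false_or,
            pvSec0, pvSec1, pvSec2, pvSec3, pvSec4, pvSec5, pvSec6, pvSec7, pvSec8,
            pvOf0, pvOf1, pvOf2, pvOf3, pvOf4, pvOf5, pvOf6, pvOf7, pvOf8,
            pvOf9, pvOf10, pvOf11, pvOf12, pvOf13, pvSec9, pvSec10, pvSec11, pvSec12, pvSec13]
          all_goals first
          | rfl
          | decide
          | (split_ifs <;> first | rfl | tauto | (exfalso; subst_vars; simp_all))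
      · rcases eq_or_ne a '2' with rfl | ha2
        · match t with
          | [] => decide
          | [b] =>
            simp only [pvAScan, pvUkBsMap, pvAltTree, PySem.Chars.startswith,
              List.take, List.drop, List.isPrefixOf, List.cons_beq_cons, List.nil_beq_eq,
              List.isEmpty_cons, List.isEmpty_nil, Char.reduceBEq, Bool.and_false, Bool.and_true,
              Bool.false_and, Bool.true_and, Bool.false_eq_true, if_false, if_true,
              Bool.and_eq_true, beq_iff_eq, List.cons.injEq, and_true, true_and, Char.reduceEq,
              reduceCtorEq, false_and, and_false, or_false, false_or,
              pvSec0, pvSec1, pvSec2, pvSec3, pvSec4, pvSec5, pvSec6, pvSec7, pvSec8,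
              pvOf0, pvOf1, pvOf2, pvOf3, pvOf4, pvOf5, pvOf6, pvOf7, pvOf8,
              pvOf9, pvOf10, pvOf11, pvOf12, pvOf13, pvSec9, pvSec10, pvSec11, pvSec12, pvSec13]
            all_goals first
            | rfl
            | decide
            | (split_ifs <;> first | rfl | tauto | (exfalso; subst_vars; simp_all))
          | b :: x :: t3 =>
            simp only [pvAScan, pvUkBsMap, pvAltTree, PySem.Chars.startswith,
              List.take, List.drop, List.isPrefixOf, List.cons_beq_cons, List.nil_beq_eq,
              List.isEmpty_cons, List.isEmpty_nil, Char.reduceBEq, Bool.and_false, Bool.and_true,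
              Bool.false_and, Bool.true_and, Bool.false_eq_true, if_false, if_true,
              Bool.and_eq_true, beq_iff_eq, List.cons.injEq, and_true, true_and, Char.reduceEq,
              reduceCtorEq, false_and, and_false, or_false, false_or,
              pvSec0, pvSec1, pvSec2, pvSec3, pvSec4, pvSec5, pvSec6, pvSec7, pvSec8,
              pvOf0, pvOf1, pvOf2, pvOf3, pvOf4, pvOf5, pvOf6, pvOf7, pvOf8,
              pvOf9, pvOf10, pvOf11, pvOf12, pvOf13, pvSec9, pvSec10, pvSec11, pvSec12, pvSec13]
            all_goals first
            | rfl
            | decide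
            | (split_ifs <;> first | rfl | tauto | (exfalso; subst_vars; simp_all))
        · rcases eq_or_ne a '3' with rfl | ha3
          · match t with
            | [] => decide
            | [b] =>
              simp only [pvAScan, pvUkBsMap, pvAltTree, PySem.Chars.startswith,
                List.take, List.drop, List.isPrefixOf, List.cons_beq_cons, List.nil_beq_eq,
                List.isEmpty_cons, List.isEmpty_nil, Char.reduceBEq, Bool.and_false, Bool.and_true,
                Bool.false_and, Bool.true_and, Bool.false_eq_true, if_false, if_true,
                Bool.and_eq_true, beq_iff_eq, List.cons.injEq, and_true, true_and, Char.reduceEq,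
                reduceCtorEq, false_and, and_false, or_false, false_or,
                pvSec0, pvSec1, pvSec2, pvSec3, pvSec4, pvSec5, pvSec6, pvSec7, pvSec8,
                pvOf0, pvOf1, pvOf2, pvOf3, pvOf4, pvOf5, pvOf6, pvOf7, pvOf8,
                pvOf9, pvOf10, pvOf11, pvOf12, pvOf13, pvSec9, pvSec10, pvSec11, pvSec12, pvSec13]
              all_goals first
              | rfl
              | decide
              | (split_ifs <;> first | rfl | tauto | (exfalso; subst_vars; simp_all))
            | [b, x] =>
              simp only [pvAScan, pvUkBsMap, pvAltTree, PySem.Chars.startswith,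
                List.take, List.drop, List.isPrefixOf, List.cons_beq_cons, List.nil_beq_eq,
                List.isEmpty_cons, List.isEmpty_nil, Char.reduceBEq, Bool.and_false, Bool.and_true,
                Bool.false_and, Bool.true_and, Bool.false_eq_true, if_false, if_true,
                Bool.and_eq_true, beq_iff_eq, List.cons.injEq, and_true, true_and, Char.reduceEq,
                reduceCtorEq, false_and, and_false, or_false, false_or,
                pvSec0, pvSec1, pvSec2, pvSec3, pvSec4, pvSec5, pvSec6, pvSec7, pvSec8,
                pvOf0, pvOf1, pvOf2, pvOf3, pvOf4, pvOf5, pvOf6, pvOf7, pvOf8,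
                pvOf9, pvOf10, pvOf11, pvOf12, pvOf13, pvSec9, pvSec10, pvSec11, pvSec12, pvSec13]
              all_goals first
              | rfl
              | decide
              | (split_ifs <;> first | rfl | tauto | (exfalso; subst_vars; simp_all))
            | b :: x :: y :: t4 =>
              simp only [pvAScan, pvUkBsMap, pvAltTree, PySem.Chars.startswith,
                List.take, List.drop, List.isPrefixOf, List.cons_beq_cons, List.nil_beq_eq,
                List.isEmpty_cons, List.isEmpty_nil, Char.reduceBEq, Bool.and_false, Bool.and_true,
                Bool.false_and, Bool.true_and, Bool.false_eq_true, if_false, if_true,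
                Bool.and_eq_true, beq_iff_eq, List.cons.injEq, and_true, true_and, Char.reduceEq,
                reduceCtorEq, false_and, and_false, or_false, false_or,
                pvSec0, pvSec1, pvSec2, pvSec3, pvSec4, pvSec5, pvSec6, pvSec7, pvSec8,
                pvOf0, pvOf1, pvOf2, pvOf3, pvOf4, pvOf5, pvOf6, pvOf7, pvOf8,
                pvOf9, pvOf10, pvOf11, pvOf12, pvOf13, pvSec9, pvSec10, pvSec11, pvSec12, pvSec13]
              all_goals first
              | rfl
              | decide
              | (split_ifs <;> first | rfl | tauto | (exfalso; subst_vars; simp_all))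
          · have h0 : ('0' == a) = false := beq_eq_false_iff_ne.mpr (Ne.symm ha0)
            have h1 : ('1' == a) = false := beq_eq_false_iff_ne.mpr (Ne.symm ha1)
            have h2 : ('2' == a) = false := beq_eq_false_iff_ne.mpr (Ne.symm ha2)
            have h3 : ('3' == a) = false := beq_eq_false_iff_ne.mpr (Ne.symm ha3)
            simp only [pvAScan, pvUkBsMap, pvAltTree, PySem.Chars.startswith,
              List.isPrefixOf, List.cons_beq_cons, List.isEmpty_cons,
              h0, h1, h2, h3, Bool.false_and, Bool.false_eq_true, if_false,
              if_neg ha0, if_neg ha1, if_neg ha2, if_neg ha3]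

-- ===== VERDICT (by name: the statement is the Claim_ definition above) =====
theorem bs_bucket_for_code_py_spec : Claim_equal_bs_bucket_for_code_py := by
  intro code _
  show bs_bucket_for_code_py code = bs_bucket_for_code_py_alt code
  unfold bs_bucket_for_code_py bs_bucket_for_code_py_alt
  by_cases h : PySem.Chars.strip code.toList = []
  · simp [h, pvAltTree]
  · simp [h, pvCore]
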